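-- pv_equiv track=rewrite | github.com/yang5hi/Healthcare_Fraud_Provider_Detector_Webapp | app/transformer.py | getFrequencyGroups
-- ===== SOURCE A (Python) =====
-- def getFrequencyGroups(dictionary, high, medium_high, medium, low):
--     high_frequency = []
--     medium_high_frequency = []
--     medium_frequency = []
--     low_fequency = []
--     rare_frequency = []
--     for key in dictionary:
--         value = dictionary[key]
--         if value >= high:
--             high_frequency.append(key)
--         elif value < high and value >= medium_high:
--             medium_high_frequency.append(key)
--         elif value < medium_high and value >= medium:
--             medium_frequency.append(key)
--         elif value < medium and value >= low:
--             low_fequency.append(key)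
--         else:
--             rare_frequency.append(key)
--     results = []
--     results.extend((high_frequency, medium_high_frequency, medium_frequency, low_fequency, rare_frequency))
--     return results
-- ===== SOURCE B (Python) =====
-- def getFrequencyGroups(dictionary, high, medium_high, medium, low):
--     thresholds = [high, medium_high, medium, low]
--
--     def in_bucket(value, i):
--         # bucket i = first threshold reached: below all earlier ones, at/above this one
--         return all(value < t for t in thresholds[:i]) and (i == 4 or value >= thresholds[i])
--
--     return [[k for k, v in dictionary.items() if in_bucket(v, i)] for i in range(5)]
-- ===== Notes on version B (the rewrite author's own statement) =====
-- stated objective: alternative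
-- what changed: Replaces A's single distributing pass with five named accumulators by five staged filter passes over the dictionary, one comprehension per bucket selecting the keys whose value is below all earlier thresholds and at/above the bucket's own.
import Mathlib
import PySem

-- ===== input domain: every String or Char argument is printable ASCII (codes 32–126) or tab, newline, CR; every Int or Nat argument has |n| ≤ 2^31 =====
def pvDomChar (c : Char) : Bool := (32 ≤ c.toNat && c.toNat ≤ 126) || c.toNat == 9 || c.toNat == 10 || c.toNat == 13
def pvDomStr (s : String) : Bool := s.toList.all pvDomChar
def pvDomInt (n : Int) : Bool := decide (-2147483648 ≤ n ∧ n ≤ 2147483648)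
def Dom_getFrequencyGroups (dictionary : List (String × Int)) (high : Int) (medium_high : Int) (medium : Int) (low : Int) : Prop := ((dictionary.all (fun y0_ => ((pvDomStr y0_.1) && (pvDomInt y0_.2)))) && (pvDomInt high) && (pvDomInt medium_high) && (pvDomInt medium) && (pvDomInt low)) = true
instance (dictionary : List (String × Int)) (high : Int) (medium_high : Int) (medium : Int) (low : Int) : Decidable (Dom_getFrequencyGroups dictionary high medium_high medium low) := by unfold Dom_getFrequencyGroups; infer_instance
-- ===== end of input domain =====

-- B replaces A's single distributing pass (five accumulators) with five staged filter
-- passes, one per bucket (objective: alternative, same O(n) cost).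

-- ===== PORT A =====
-- Five named accumulators threaded through the loop, then packed into the result list.
def getFrequencyGroups (dictionary : List (String × Int)) (high : Int) (medium_high : Int) (medium : Int) (low : Int) : List (List String) :=
  let s := dictionary.foldl
    (fun (s : List String × List String × List String × List String × List String) kv =>
      let key := kv.1
      let value := kv.2
      if value ≥ high then
        (s.1 ++ [key], s.2.1, s.2.2.1, s.2.2.2.1, s.2.2.2.2)
      else if value < high ∧ value ≥ medium_high then
        (s.1, s.2.1 ++ [key], s.2.2.1, s.2.2.2.1, s.2.2.2.2)
      else if value < medium_high ∧ value ≥ medium then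
        (s.1, s.2.1, s.2.2.1 ++ [key], s.2.2.2.1, s.2.2.2.2)
      else if value < medium ∧ value ≥ low then
        (s.1, s.2.1, s.2.2.1, s.2.2.2.1 ++ [key], s.2.2.2.2)
      else
        (s.1, s.2.1, s.2.2.1, s.2.2.2.1, s.2.2.2.2 ++ [key]))
    ([], [], [], [], [])
  [s.1, s.2.1, s.2.2.1, s.2.2.2.1, s.2.2.2.2]

-- ===== PORT B =====
-- in_bucket(value, i): value below all thresholds[:i] and (i == 4 or value >= thresholds[i])
def pvInBucket (value : Int) (ts : List Int) (i : Nat) : Bool :=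
  ((ts.take i).all fun t => decide (value < t)) && (i == 4 || decide (value ≥ ts.getD i 0))

def getFrequencyGroups_alt (dictionary : List (String × Int)) (high : Int) (medium_high : Int) (medium : Int) (low : Int) : List (List String) :=
  let ts : List Int := [high, medium_high, medium, low]
  (List.range 5).map fun i => (dictionary.filter fun kv => pvInBucket kv.2 ts i).map Prod.fst

-- ===== PRECONDITION & SPEC =====
def Spec_getFrequencyGroups (dictionary : List (String × Int)) (high : Int) (medium_high : Int) (medium : Int) (low : Int) (out : List (List String)) : Prop := out = getFrequencyGroups_alt dictionary high medium_high medium low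
instance (dictionary : List (String × Int)) (high : Int) (medium_high : Int) (medium : Int) (low : Int) (out : List (List String)) : Decidable (Spec_getFrequencyGroups dictionary high medium_high medium low out) := by unfold Spec_getFrequencyGroups; infer_instance

-- ===== CLAIM (what is proved, stated in full; the proofs are below) =====
def Claim_equal_getFrequencyGroups : Prop := ∀ (dictionary : List (String × Int)) (high : Int) (medium_high : Int) (medium : Int) (low : Int), Dom_getFrequencyGroups dictionary high medium_high medium low → Spec_getFrequencyGroups dictionary high medium_high medium low (getFrequencyGroups dictionary high medium_high medium low)

-- ===== LEMMAS AND PROOFS =====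
-- Loop invariant: A's five-tuple fold starting from (a,b,c,d,e), packed as a list,
-- equals the five filter passes appended to a,b,c,d,e respectively.
lemma pvLoop_eq (high medium_high medium low : Int) :
    ∀ (l : List (String × Int)) (a b c d e : List String),
    (let s := l.foldl
      (fun (s : List String × List String × List String × List String × List String) kv =>
        let key := kv.1
        let value := kv.2
        if value ≥ high then
          (s.1 ++ [key], s.2.1, s.2.2.1, s.2.2.2.1, s.2.2.2.2)
        else if value < high ∧ value ≥ medium_high then
          (s.1, s.2.1 ++ [key], s.2.2.1, s.2.2.2.1, s.2.2.2.2)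
        else if value < medium_high ∧ value ≥ medium then
          (s.1, s.2.1, s.2.2.1 ++ [key], s.2.2.2.1, s.2.2.2.2)
        else if value < medium ∧ value ≥ low then
          (s.1, s.2.1, s.2.2.1, s.2.2.2.1 ++ [key], s.2.2.2.2)
        else
          (s.1, s.2.1, s.2.2.1, s.2.2.2.1, s.2.2.2.2 ++ [key]))
      (a, b, c, d, e)
     [s.1, s.2.1, s.2.2.1, s.2.2.2.1, s.2.2.2.2]) =
    [a ++ (l.filter fun kv => pvInBucket kv.2 [high, medium_high, medium, low] 0).map Prod.fst,
     b ++ (l.filter fun kv => pvInBucket kv.2 [high, medium_high, medium, low] 1).map Prod.fst,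
     c ++ (l.filter fun kv => pvInBucket kv.2 [high, medium_high, medium, low] 2).map Prod.fst,
     d ++ (l.filter fun kv => pvInBucket kv.2 [high, medium_high, medium, low] 3).map Prod.fst,
     e ++ (l.filter fun kv => pvInBucket kv.2 [high, medium_high, medium, low] 4).map Prod.fst] := by
  intro l
  induction l with
  | nil => intro a b c d e; simp
  | cons kv rest ih =>
      intro a b c d e
      simp only [List.foldl_cons, List.filter_cons]
      by_cases h1 : kv.2 ≥ high
      · have n1 : ¬ kv.2 < high := Int.not_lt.mpr h1
        simpa [pvInBucket, h1, n1, List.append_assoc] using ih (a ++ [kv.1]) b c d e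
      · have p1 : kv.2 < high := Int.not_le.mp h1
        by_cases h2 : kv.2 ≥ medium_high
        · have n2 : ¬ kv.2 < medium_high := Int.not_lt.mpr h2
          simpa [pvInBucket, h1, h2, p1, n2, List.append_assoc] using ih a (b ++ [kv.1]) c d e
        · have p2 : kv.2 < medium_high := Int.not_le.mp h2
          by_cases h3 : kv.2 ≥ medium
          · have n3 : ¬ kv.2 < medium := Int.not_lt.mpr h3
            simpa [pvInBucket, h1, h2, h3, p1, p2, n3, List.append_assoc] using
              ih a b (c ++ [kv.1]) d e
          · have p3 : kv.2 < medium := Int.not_le.mp h3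
            by_cases h4 : kv.2 ≥ low
            · have n4 : ¬ kv.2 < low := Int.not_lt.mpr h4
              simpa [pvInBucket, h1, h2, h3, h4, p1, p2, p3, n4, List.append_assoc] using
                ih a b c (d ++ [kv.1]) e
            · have p4 : kv.2 < low := Int.not_le.mp h4
              simpa [pvInBucket, h1, h2, h3, h4, p1, p2, p3, p4, List.append_assoc] using
                ih a b c d (e ++ [kv.1])

-- ===== VERDICT (by name: the statement is the Claim_ definition above) =====
theorem getFrequencyGroups_spec : Claim_equal_getFrequencyGroups := by
  intro dictionary high medium_high medium low _
  unfold Spec_getFrequencyGroups getFrequencyGroups getFrequencyGroups_alt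
  have h := pvLoop_eq high medium_high medium low dictionary [] [] [] [] []
  simpa [List.range_succ] using h
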